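-- pv_equiv track=rewrite | github.com/Rittikasur/Image-Retreival | mAp/metrics.py | _SortPredictions
-- ===== SOURCE A (Python) =====
-- def _SortPredictions(predictions,ground_truth):
--     truth_list = []
--     false_list = []
--     ground_truth = ground_truth[14:len(ground_truth)-6]
--     for prediction in predictions:
--         if prediction.__contains__(ground_truth):
--             truth_list.append(prediction)
--         else:
--             false_list.append(prediction)
--     return truth_list + false_list
-- ===== SOURCE B (Python) =====
-- def _SortPredictions(predictions, ground_truth):
--     ground_truth = ground_truth[14:len(ground_truth)-6]
--     # stable sort on a boolean key: matches first (in original order), then non-matches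
--     return sorted(predictions, key=lambda p: ground_truth not in p)
-- ===== Notes on version B (the rewrite author's own statement) =====
-- stated objective: idiomatic
-- what changed: Replaces the explicit two-list partition loop and concatenation with a single stable sort keyed on the boolean 'ground_truth not in p'.
import Mathlib
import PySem

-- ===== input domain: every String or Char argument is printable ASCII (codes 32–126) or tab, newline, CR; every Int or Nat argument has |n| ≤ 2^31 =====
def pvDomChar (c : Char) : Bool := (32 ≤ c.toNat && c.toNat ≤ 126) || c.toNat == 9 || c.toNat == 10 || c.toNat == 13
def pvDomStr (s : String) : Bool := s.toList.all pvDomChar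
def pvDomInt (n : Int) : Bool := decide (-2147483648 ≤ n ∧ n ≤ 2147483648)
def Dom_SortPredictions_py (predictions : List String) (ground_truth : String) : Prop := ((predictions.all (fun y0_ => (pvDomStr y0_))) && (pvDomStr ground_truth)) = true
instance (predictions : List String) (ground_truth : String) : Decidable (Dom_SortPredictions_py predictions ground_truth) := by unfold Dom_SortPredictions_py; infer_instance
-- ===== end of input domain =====

-- B replaces A's explicit two-list partition loop by one stable sort on the membership key (idiomatic rewrite, same result).

-- ===== PORT A =====
def SortPredictions_py (predictions : List String) (ground_truth : String) : List String :=
  -- ground_truth = ground_truth[14:len(ground_truth)-6]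
  let g := PySem.Str.slice ground_truth (some 14) (some (PySem.Str.len ground_truth - 6))
  -- for prediction in predictions: append to truth_list / false_list
  let acc := predictions.foldl
    (fun (acc : List String × List String) p =>
      if PySem.Str.isIn g p then (acc.1 ++ [p], acc.2) else (acc.1, acc.2 ++ [p]))
    ([], [])
  acc.1 ++ acc.2

-- ===== PORT B =====
-- Python's bool key (False < True) is ported as Nat 0/1, Python's ordering of booleans.
def pvKey (g : String) (p : String) : Nat := if PySem.Str.isIn g p then 0 else 1

def SortPredictions_py_alt (predictions : List String) (ground_truth : String) : List String :=
  let g := PySem.Str.slice ground_truth (some 14) (some (PySem.Str.len ground_truth - 6))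
  PySem.List.sorted predictions (pvKey g)

-- ===== PRECONDITION & SPEC =====
def Spec_SortPredictions_py (predictions : List String) (ground_truth : String) (out : List String) : Prop := out = SortPredictions_py_alt predictions ground_truth
instance (predictions : List String) (ground_truth : String) (out : List String) : Decidable (Spec_SortPredictions_py predictions ground_truth out) := by unfold Spec_SortPredictions_py; infer_instance

-- ===== CLAIM (what is proved, stated in full; the proofs are below) =====
def Claim_equal_SortPredictions_py : Prop := ∀ (predictions : List String) (ground_truth : String), Dom_SortPredictions_py predictions ground_truth → Spec_SortPredictions_py predictions ground_truth (SortPredictions_py predictions ground_truth)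

-- ===== LEMMAS AND PROOFS =====

-- key values from membership facts (kept abstract so simp never unfolds isIn)
theorem pvKey_eq_zero (g x : String) (h : PySem.Str.isIn g x = true) : pvKey g x = 0 := by
  simp only [pvKey, h, if_true]

theorem pvKey_eq_one (g x : String) (h : PySem.Str.isIn g x = false) : pvKey g x = 1 := by
  simp only [pvKey, h, Bool.false_eq_true, if_false]

-- inserting into a partitioned list A++B (A = matches, B = non-matches)
theorem pv_insertBy_partition (g x : String) (A B : List String)
    (hA : ∀ a ∈ A, PySem.Str.isIn g a = true)
    (hB : ∀ b ∈ B, PySem.Str.isIn g b = false) :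
    PySem.List.insertBy (fun a b => decide (pvKey g a < pvKey g b)) x (A ++ B)
      = if PySem.Str.isIn g x then A ++ x :: B else A ++ B ++ [x] := by
  induction A with
  | nil =>
    simp only [List.nil_append]
    by_cases hx : PySem.Str.isIn g x = true
    · cases B with
      | nil => simp only [PySem.List.insertBy, hx, if_true]
      | cons b bs =>
        have hb := hB b (by simp)
        rw [show PySem.List.insertBy (fun a b => decide (pvKey g a < pvKey g b)) x (b :: bs)
              = if decide (pvKey g x < pvKey g b) = true then x :: b :: bs
                else b :: PySem.List.insertBy (fun a b => decide (pvKey g a < pvKey g b)) x bs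
              from rfl]
        rw [pvKey_eq_zero g x hx, pvKey_eq_one g b hb]
        simp only [hx, if_true]
        norm_num
    · rw [PySem.List.insertBy_of_forall_not_before]
      · simp only [hx, Bool.false_eq_true, if_false]
      · intro y hy
        rw [pvKey_eq_one g x (by revert hx; cases PySem.Str.isIn g x <;> simp)]
        have : pvKey g y ≤ 1 := by unfold pvKey; split <;> omega
        simpa using this
  | cons a A' ih =>
    have ha := hA a (by simp)
    have ih' := ih (fun a' h => hA a' (by simp [h]))
    simp only [List.cons_append]
    rw [show PySem.List.insertBy (fun a b => decide (pvKey g a < pvKey g b)) x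
          (a :: (A' ++ B))
        = if decide (pvKey g x < pvKey g a) = true then
            x :: a :: (A' ++ B)
          else a :: PySem.List.insertBy (fun a' b => decide (pvKey g a' < pvKey g b)) x (A' ++ B)
        from rfl]
    rw [pvKey_eq_zero g a ha]
    have hnlt : ¬ pvKey g x < 0 := by omega
    simp only [hnlt, decide_false, Bool.false_eq_true, if_false, ih']
    by_cases hx : PySem.Str.isIn g x = true <;> simp only [hx, Bool.false_eq_true, if_true, if_false]

-- the sort's foldl maintains the partition invariant
theorem pv_sort_fold (g : String) (xs A B : List String)
    (hA : ∀ a ∈ A, PySem.Str.isIn g a = true)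
    (hB : ∀ b ∈ B, PySem.Str.isIn g b = false) :
    xs.foldl (fun acc x => PySem.List.insertBy (fun a b => decide (pvKey g a < pvKey g b)) x acc)
        (A ++ B)
      = (A ++ xs.filter (fun p => PySem.Str.isIn g p))
        ++ (B ++ xs.filter (fun p => !PySem.Str.isIn g p)) := by
  induction xs generalizing A B with
  | nil => simp
  | cons x xs ih =>
    simp only [List.foldl_cons]
    rw [pv_insertBy_partition g x A B hA hB]
    by_cases hx : PySem.Str.isIn g x = true
    · rw [if_pos hx, show A ++ x :: B = (A ++ [x]) ++ B by simp]
      rw [ih (A ++ [x]) B ?_ hB]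
      · simp only [List.filter_cons, hx, Bool.not_true, if_true, Bool.false_eq_true, if_false,
          List.append_assoc, List.singleton_append]
      · intro a ha
        rcases List.mem_append.1 ha with h | h
        · exact hA a h
        · simp only [List.mem_singleton] at h
          simpa [h] using hx
    · rw [if_neg hx, show A ++ B ++ [x] = A ++ (B ++ [x]) by simp]
      rw [ih A (B ++ [x]) hA ?_]
      · simp only [List.filter_cons, hx, Bool.not_false, Bool.false_eq_true, if_false, if_true,
          List.append_assoc, List.singleton_append]
      · intro b hb
        rcases List.mem_append.1 hb with h | h
        · exact hB b h
        · simp only [List.mem_singleton] at h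
          subst h
          simpa using hx

-- A's partition loop in closed form
theorem pv_partition_fold (g : String) (xs tl fl : List String) :
    xs.foldl (fun (acc : List String × List String) p =>
        if PySem.Str.isIn g p then (acc.1 ++ [p], acc.2) else (acc.1, acc.2 ++ [p]))
      (tl, fl)
      = (tl ++ xs.filter (fun p => PySem.Str.isIn g p),
         fl ++ xs.filter (fun p => !PySem.Str.isIn g p)) := by
  induction xs generalizing tl fl with
  | nil => simp
  | cons x xs ih =>
    simp only [List.foldl_cons]
    by_cases hx : PySem.Str.isIn g x = true <;>
      simp only [hx, if_true, Bool.false_eq_true, if_false, ih, List.filter_cons,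
        Bool.not_true, Bool.not_false] <;>
      simp only [List.append_assoc, List.singleton_append]

theorem pv_sort_fold_nil (g : String) (xs : List String) :
    xs.foldl (fun acc x => PySem.List.insertBy (fun a b => decide (pvKey g a < pvKey g b)) x acc) []
      = xs.filter (fun p => PySem.Str.isIn g p) ++ xs.filter (fun p => !PySem.Str.isIn g p) := by
  have h := pv_sort_fold g xs [] [] (by simp) (by simp)
  simpa only [List.nil_append, List.append_nil] using h

-- ===== VERDICT (by name: the statement is the Claim_ definition above) =====
theorem SortPredictions_py_spec : Claim_equal_SortPredictions_py := by
  intro predictions ground_truth _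
  unfold Spec_SortPredictions_py SortPredictions_py SortPredictions_py_alt
  dsimp only
  rw [PySem.List.sorted_eq_foldl_insertBy]
  rw [pv_sort_fold_nil, pv_partition_fold]
  simp only [List.nil_append]
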